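-- pv_equiv track=rewrite | github.com/Joshua992700/ESEC-Portal | Time Complexity/Trailing zeros.py | find_n_for_m
-- ===== SOURCE A (Python) =====
-- import itertools
--
-- def trailing_zeroes(n):
--     count = 0
--     while n > 0:
--         n //= 5
--         count += n
--     return count
--
-- def find_n_for_m(m):
--     n_values = []
--
--     # Use itertools.count to generate numbers starting from 0
--     for n in itertools.count(0):
--         z = trailing_zeroes(n)
--         if z == m:
--             n_values.append(n)
--         elif z > m:
--             break  # No need to check further, as trailing zeroes will only increase
--
--     return n_values
-- ===== SOURCE B (Python) =====
-- def trailing_zeroes(n):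
--     count = 0
--     while n > 0:
--         n //= 5
--         count += n
--     return count
--
-- def find_n_for_m(m):
--     # binary search for the least n with trailing_zeroes(n) >= m
--     lo, hi = 0, 5 * m + 5
--     while lo < hi:
--         mid = (lo + hi) // 2
--         if trailing_zeroes(mid) < m:
--             lo = mid + 1
--         else:
--             hi = mid
--     if trailing_zeroes(lo) == m:
--         return list(range(lo, lo + 5))
--     return []
-- ===== Notes on version B (the rewrite author's own statement) =====
-- stated objective: faster
-- what changed: Replaces A's linear scan from 0 with a binary search for the least n whose factorial has at least m trailing zeros, then returns the 5-element block [n, n+5) if it matches exactly.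
import Mathlib
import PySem

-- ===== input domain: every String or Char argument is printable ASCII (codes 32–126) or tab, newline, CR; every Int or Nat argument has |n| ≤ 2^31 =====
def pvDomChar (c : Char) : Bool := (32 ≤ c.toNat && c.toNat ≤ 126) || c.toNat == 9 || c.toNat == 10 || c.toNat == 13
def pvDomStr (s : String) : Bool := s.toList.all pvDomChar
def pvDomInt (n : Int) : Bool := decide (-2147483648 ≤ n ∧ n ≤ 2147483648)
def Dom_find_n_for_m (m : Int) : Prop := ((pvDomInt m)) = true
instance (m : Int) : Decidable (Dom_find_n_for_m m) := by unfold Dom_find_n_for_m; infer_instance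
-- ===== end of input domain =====

-- B replaces A's linear scan from 0 with a binary search for the least n with
-- trailing_zeroes(n) ≥ m (objective: faster).

-- ===== PORT A =====
-- trailing_zeroes: while n > 0: n //= 5; count += n
def tzLoopA (n count : Int) : Int :=
  if 0 < n then tzLoopA (PySem.Int.floordiv n 5) (count + PySem.Int.floordiv n 5) else count
termination_by n.toNat
decreasing_by
  rw [PySem.Int.floordiv_eq_ediv_of_pos (by omega : (0:Int) < 5)]; omega

def trailing_zeroesA (n : Int) : Int := tzLoopA n 0

-- the for-n-in-count(0) loop, made total with fuel (fuel never runs out: see proofs)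
def aLoop (m : Int) (fuel : Nat) (n : Int) (acc : List Int) : List Int :=
  match fuel with
  | 0 => acc
  | fuel + 1 =>
    let z := trailing_zeroesA n
    if z = m then aLoop m fuel (n + 1) (acc ++ [n])
    else if z > m then acc
    else aLoop m fuel (n + 1) acc

def find_n_for_m (m : Int) : List Int := aLoop m (5 * m.toNat + 12) 0 []

-- ===== PORT B =====
def tzLoopB (n count : Int) : Int :=
  if 0 < n then tzLoopB (PySem.Int.floordiv n 5) (count + PySem.Int.floordiv n 5) else count
termination_by n.toNat
decreasing_by
  rw [PySem.Int.floordiv_eq_ediv_of_pos (by omega : (0:Int) < 5)]; omega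

def trailing_zeroesB (n : Int) : Int := tzLoopB n 0

-- while lo < hi: mid = (lo+hi)//2; if tz(mid) < m: lo = mid+1 else: hi = mid
def bsearch (m lo hi : Int) : Int :=
  if lo < hi then
    let mid := PySem.Int.floordiv (lo + hi) 2
    if trailing_zeroesB mid < m then bsearch m (mid + 1) hi else bsearch m lo mid
  else lo
termination_by (hi - lo).toNat
decreasing_by
  · have h2 := (PySem.Int.floordiv_two_mid_bounds (by omega : lo ≤ hi)).1
    omega
  · have h2 : PySem.Int.floordiv (lo + hi) 2 < hi := by
      rw [PySem.Int.floordiv_lt_iff_lt_mul (by omega : (0:Int) < 2)]; omega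
    omega

def find_n_for_m_alt (m : Int) : List Int :=
  let lo := bsearch m 0 (5 * m + 5)
  if trailing_zeroesB lo = m then PySem.List.pyRange lo (lo + 5) 1 else []

-- ===== PRECONDITION & SPEC =====
def Spec_find_n_for_m (m : Int) (out : List Int) : Prop := out = find_n_for_m_alt m
instance (m : Int) (out : List Int) : Decidable (Spec_find_n_for_m m out) := by unfold Spec_find_n_for_m; infer_instance

-- ===== CLAIM (what is proved, stated in full; the proofs are below) =====
def Claim_equal_find_n_for_m : Prop := ∀ (m : Int), Dom_find_n_for_m m → Spec_find_n_for_m m (find_n_for_m m)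

-- ===== LEMMAS AND PROOFS =====

theorem tzLoopB_eq (n c : Int) : tzLoopB n c = tzLoopA n c := by
  rw [tzLoopB, tzLoopA]
  split
  · exact tzLoopB_eq _ _
  · rfl
termination_by n.toNat
decreasing_by
  rw [PySem.Int.floordiv_eq_ediv_of_pos (by omega : (0:Int) < 5)]; omega

@[simp] theorem tzB_eq (n : Int) : trailing_zeroesB n = trailing_zeroesA n := tzLoopB_eq n 0

theorem tzLoopA_shift (n c : Int) : tzLoopA n c = c + tzLoopA n 0 := by
  conv_lhs => rw [tzLoopA]
  conv_rhs => rw [tzLoopA]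
  by_cases h : 0 < n
  · rw [if_pos h, if_pos h, tzLoopA_shift _ (c + _), tzLoopA_shift _ (0 + _)]; ring
  · rw [if_neg h, if_neg h]; ring
termination_by n.toNat
decreasing_by
  all_goals rw [PySem.Int.floordiv_eq_ediv_of_pos (by omega : (0:Int) < 5)]; omega

theorem tz_unfold {n : Int} (h : 0 < n) :
    trailing_zeroesA n = PySem.Int.floordiv n 5 + trailing_zeroesA (PySem.Int.floordiv n 5) := by
  unfold trailing_zeroesA
  rw [tzLoopA, if_pos h, tzLoopA_shift]; ring

theorem tz_nonpos {n : Int} (h : ¬ 0 < n) : trailing_zeroesA n = 0 := by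
  unfold trailing_zeroesA
  rw [tzLoopA, if_neg h]

theorem floordiv5_eq {n : Int} : PySem.Int.floordiv n 5 = n / 5 :=
  PySem.Int.floordiv_eq_ediv_of_pos (by omega)

theorem tz_nonneg (n : Int) : 0 ≤ trailing_zeroesA n := by
  by_cases h : 0 < n
  · rw [tz_unfold h]
    have := tz_nonneg (PySem.Int.floordiv n 5)
    rw [floordiv5_eq] at *
    omega
  · rw [tz_nonpos h]
termination_by n.toNat
decreasing_by rw [floordiv5_eq]; omega

theorem tz_mono (a b : Int) (ha : 0 ≤ a) (hab : a ≤ b) :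
    trailing_zeroesA a ≤ trailing_zeroesA b := by
  by_cases hb : 0 < b
  · by_cases ha' : 0 < a
    · rw [tz_unfold ha', tz_unfold hb]
      have hd : PySem.Int.floordiv a 5 ≤ PySem.Int.floordiv b 5 := by
        rw [floordiv5_eq, floordiv5_eq]; omega
      have hd0 : 0 ≤ PySem.Int.floordiv a 5 := by rw [floordiv5_eq]; omega
      have := tz_mono (PySem.Int.floordiv a 5) (PySem.Int.floordiv b 5) hd0 hd
      omega
    · rw [tz_nonpos ha']; exact tz_nonneg b
  · have : a = b := by omega
    rw [this]
termination_by b.toNat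
decreasing_by rw [floordiv5_eq]; omega

-- trailing zeroes are constant on each block [5k, 5k+5)
theorem tz_block {k j : Int} (hk : 0 ≤ k) (hj0 : 0 ≤ j) (hj : j < 5) :
    trailing_zeroesA (5 * k + j) = k + trailing_zeroesA k := by
  by_cases h : 0 < 5 * k + j
  · rw [tz_unfold h]
    have hd : PySem.Int.floordiv (5 * k + j) 5 = k := by rw [floordiv5_eq]; omega
    rw [hd]
  · have hk0 : k = 0 := by omega
    rw [tz_nonpos h, hk0, tz_nonpos (by omega : ¬ (0:Int) < 0)]
    omega

-- binary-search invariant: the result is the least n ≥ lo with tz n ≥ m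
theorem bsearch_spec (m lo hi : Int) (h0 : 0 ≤ lo) (hle : lo ≤ hi)
    (hhi : m ≤ trailing_zeroesA hi) :
    lo ≤ bsearch m lo hi ∧ bsearch m lo hi ≤ hi ∧ m ≤ trailing_zeroesA (bsearch m lo hi) ∧
      ∀ x, lo ≤ x → x < bsearch m lo hi → trailing_zeroesA x < m := by
  rw [bsearch]
  split
  · rename_i hlt
    have hmidb := PySem.Int.floordiv_two_mid_bounds (by omega : lo ≤ hi)
    have hmlt : PySem.Int.floordiv (lo + hi) 2 < hi := by
      rw [PySem.Int.floordiv_lt_iff_lt_mul (by omega : (0:Int) < 2)]; omega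
    set mid := PySem.Int.floordiv (lo + hi) 2 with hmid
    simp only [tzB_eq]
    split
    · rename_i hcond
      have ih := bsearch_spec m (mid + 1) hi (by omega) (by omega) hhi
      refine ⟨by omega, ih.2.1, ih.2.2.1, ?_⟩
      intro x hx hxr
      by_cases hxm : x ≤ mid
      · exact lt_of_le_of_lt (tz_mono x mid (by omega) hxm) hcond
      · exact ih.2.2.2 x (by omega) hxr
    · rename_i hcond
      have ih := bsearch_spec m lo mid h0 (by omega) (by omega)
      exact ⟨ih.1, by have := ih.2.1; omega, ih.2.2.1, ih.2.2.2⟩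
  · have heq : lo = hi := by omega
    subst heq
    exact ⟨le_refl _, le_refl _, hhi, by omega⟩
termination_by (hi - lo).toNat
decreasing_by all_goals omega

-- collecting phase of A's loop: from f+j it appends f+j, …, f+4 and breaks at f+5
theorem aLoop_collect (m f : Int)
    (hblk : ∀ j, 0 ≤ j → j < 5 → trailing_zeroesA (f + j) = m)
    (hend : m < trailing_zeroesA (f + 5)) :
    ∀ (fuel : Nat) (j : Int) (acc : List Int), 0 ≤ j → j ≤ 5 → (5 - j).toNat + 1 ≤ fuel →
      aLoop m fuel (f + j) acc = acc ++ PySem.List.pyRange (f + j) (f + 5) 1 := by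
  intro fuel
  induction fuel with
  | zero => intro j acc _ _ hf; omega
  | succ fuel ih =>
    intro j acc hj0 hj5 hf
    rw [aLoop]
    by_cases hj : j = 5
    · subst hj
      simp only [if_neg (by omega : ¬ trailing_zeroesA (f + 5) = m), if_pos hend]
      have : PySem.List.pyRange (f + 5) (f + 5) 1 = [] := by
        rw [PySem.List.pyRange_one]; simp
      rw [this, List.append_nil]
    · have hz := hblk j hj0 (by omega)
      simp only [if_pos hz]
      have h1 : f + j + 1 = f + (j + 1) := by ring
      rw [h1, ih (j + 1) (acc ++ [f + j]) (by omega) (by omega) (by omega)]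
      rw [PySem.List.pyRange_one_cons (by omega : f + j < f + 5)]
      simp [h1]

-- skipping phase of A's loop: below f every tz is < m, so nothing is appended
theorem aLoop_skip (m f : Int) (hf0 : 0 ≤ f)
    (hfm : m ≤ trailing_zeroesA f)
    (hmin : ∀ x, 0 ≤ x → x < f → trailing_zeroesA x < m) :
    ∀ (fuel : Nat) (n : Int) (acc : List Int), 0 ≤ n → n ≤ f → (f - n).toNat + 7 ≤ fuel →
      aLoop m fuel n acc =
        acc ++ (if trailing_zeroesA f = m then PySem.List.pyRange f (f + 5) 1 else []) := by
  intro fuel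
  induction fuel with
  | zero => intro n acc _ _ hfu; omega
  | succ fuel ih =>
    intro n acc hn0 hnf hfu
    rw [aLoop]
    by_cases hn : n = f
    · subst hn
      by_cases hm : trailing_zeroesA n = m
      · -- block facts: n = 5k and tz is m on [n, n+5), > m at n+5
        have hm0 : 0 ≤ m := hm ▸ tz_nonneg n
        set k := PySem.Int.floordiv n 5 with hk
        have hk0 : 0 ≤ k := by rw [hk, floordiv5_eq]; omega
        have hkle : 5 * k ≤ n ∧ n < 5 * k + 5 := by
          constructor <;> [skip; skip] <;> (rw [hk, floordiv5_eq]; omega)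
        have htzn : trailing_zeroesA n = k + trailing_zeroesA k := by
          by_cases h : 0 < n
          · rw [tz_unfold h, ← hk]
          · have : n = 0 := by omega
            subst this
            have hkz : k = 0 := by rw [hk, floordiv5_eq]; omega
            rw [hkz]; omega
        have hnk : n = 5 * k := by
          by_contra hne
          have h5k : trailing_zeroesA (5 * k) = m := by
            have e : 5 * k = 5 * k + (0:Int) := by ring
            rw [e, tz_block hk0 (by omega) (by omega : (0:Int) < 5)]; omega
          have := hmin (5 * k) (by omega) (by omega)
          omega
        have hblk : ∀ j, 0 ≤ j → j < 5 → trailing_zeroesA (n + j) = m := by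
          intro j hj0 hj5
          have : n + j = 5 * k + j := by omega
          rw [this, tz_block hk0 hj0 hj5]; omega
        have hend : m < trailing_zeroesA (n + 5) := by
          have : n + 5 = 5 * (k + 1) + 0 := by omega
          rw [this, tz_block (by omega) (by omega) (by omega)]
          have := tz_mono k (k + 1) hk0 (by omega)
          omega
        simp only [if_pos hm]
        have h1 : n + 1 = n + (1:Int) := rfl
        rw [aLoop_collect m n hblk hend fuel 1 (acc ++ [n]) (by omega) (by omega) (by omega)]
        rw [PySem.List.pyRange_one_cons (by omega : n < n + 5)]
        simp
      · simp only [if_neg hm, if_pos (by omega : trailing_zeroesA n > m), List.append_nil]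
    · have hlt := hmin n hn0 (by omega)
      simp only [if_neg (by omega : ¬ trailing_zeroesA n = m),
        if_neg (by omega : ¬ trailing_zeroesA n > m)]
      exact ih (n + 1) acc (by omega) (by omega) (by omega)

-- ===== VERDICT (by name: the statement is the Claim_ definition above) =====
theorem find_n_for_m_spec : Claim_equal_find_n_for_m := by
  intro m _
  unfold Spec_find_n_for_m find_n_for_m find_n_for_m_alt
  by_cases hm : 0 ≤ m
  · have hhi : m < trailing_zeroesA (5 * m + 5) := by
      have : 5 * m + 5 = 5 * (m + 1) + 0 := by ring
      rw [this, tz_block (by omega) (by omega) (by omega)]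
      have := tz_nonneg (m + 1)
      omega
    obtain ⟨hf1, hf2, hf3, hf4⟩ :=
      bsearch_spec m 0 (5 * m + 5) (le_refl 0) (by omega) (by omega)
    set f := bsearch m 0 (5 * m + 5) with hf
    rw [aLoop_skip m f hf1 hf3 (fun x hx hxf => hf4 x hx hxf)
      (5 * m.toNat + 12) 0 [] (le_refl 0) hf1 (by omega)]
    simp only [tzB_eq, List.nil_append]
  · -- m < 0: A breaks at n = 0 (tz 0 = 0 > m); B's search range is empty
    have htz0 : trailing_zeroesA 0 = 0 := tz_nonpos (by omega)
    have hb : bsearch m 0 (5 * m + 5) = 0 := by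
      rw [bsearch, if_neg (by omega : ¬ (0:Int) < 5 * m + 5)]
    rw [hb]
    simp only [tzB_eq, htz0, if_neg (by omega : ¬ (0:Int) = m)]
    rw [show 5 * m.toNat + 12 = 11 + 1 by omega, aLoop]
    simp only [htz0, if_neg (by omega : ¬ (0:Int) = m), if_pos (by omega : (0:Int) > m)]
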